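-- pv_equiv track=rewrite | github.com/tkgoecker/Data_Science_Assignment | src/nlp_entities.py | find_terms
-- ===== SOURCE A (Python) =====
-- from typing import Dict, List
--
-- def find_terms(text: str, terms: List[str]) -> List[str]:
--     text_l = text.lower()
--     found = []
--     for term in terms:
--         if term.lower() in text_l:
--             found.append(term)
--
--     seen = set()
--     out = []
--     for x in found:
--         xl = x.lower()
--         if xl not in seen:
--             seen.add(xl)
--             out.append(x)
--     return out
-- ===== SOURCE B (Python) =====
-- def find_terms(text, terms):
--     # Multi-pattern search: enumerate substrings of the lowered text (one scan,
--     # one candidate length per distinct term length) and look them up in a hash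
--     # set of lowered terms; then emit terms in original order, dedup by lowercase.
--     text_l = text.lower()
--     n = len(text_l)
--     lowers = [t.lower() for t in terms]
--     termset = set(lowers)
--     lengths = {len(t) for t in termset}
--     matched = set()
--     for i in range(n + 1):
--         for L in lengths:
--             if i + L <= n:
--                 sub = text_l[i:i + L]
--                 if sub in termset:
--                     matched.add(sub)
--     out = []
--     seen = set()
--     for term, tl in zip(terms, lowers):
--         if tl not in seen:
--             seen.add(tl)
--             if tl in matched:
--                 out.append(term)
--     return out
-- ===== Notes on version B (the rewrite author's own statement) =====
-- stated objective: faster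
-- what changed: Instead of running one substring search over the text per term (A), B scans the text once, looking each candidate substring (one per position and distinct term length) up in a hash set of lowered terms, then emits terms in original order deduplicated by lowercase.
import Mathlib
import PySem

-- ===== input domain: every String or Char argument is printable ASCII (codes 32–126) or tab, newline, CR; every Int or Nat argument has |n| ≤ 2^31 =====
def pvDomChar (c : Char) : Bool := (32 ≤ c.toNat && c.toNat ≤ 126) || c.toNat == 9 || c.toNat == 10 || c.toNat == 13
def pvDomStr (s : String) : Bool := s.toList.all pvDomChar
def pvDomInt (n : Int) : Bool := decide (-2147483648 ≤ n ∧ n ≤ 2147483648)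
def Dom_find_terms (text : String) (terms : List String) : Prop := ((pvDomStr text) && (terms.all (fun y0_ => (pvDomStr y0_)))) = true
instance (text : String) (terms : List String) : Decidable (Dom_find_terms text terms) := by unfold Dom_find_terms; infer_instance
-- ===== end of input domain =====

-- B replaces the per-term substring search by one scan of the text that looks up each
-- candidate substring (one per position and distinct term length) in a set of lowered terms.

-- ===== PORT A =====
-- A: first pass collects every term whose lowercase is a substring of the lowered text;
-- second pass dedups the hits by lowercase, keeping the first occurrence.
def find_terms (text : String) (terms : List String) : List String :=
  let textL := PySem.Str.lower text
  let found := terms.foldl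
    (fun acc term => if PySem.Str.isIn (PySem.Str.lower term) textL then acc ++ [term] else acc) []
  (found.foldl
    (fun (st : PySem.Set String × List String) x =>
      let xl := PySem.Str.lower x
      if xl ∈ st.1 then st else (PySem.Set.add st.1 xl, st.2 ++ [x]))
    (PySem.Set.empty, [])).2

-- ===== PORT B =====
-- inner body of B's scan: 'if i + L <= n: sub = text_l[i:i+L]; if sub in termset: matched.add(sub)'
def pvScanStep (textL : String) (termset : PySem.Set String) (n : Int)
    (m : PySem.Set String) (i L : Int) : PySem.Set String :=
  if i + L ≤ n ∧ PySem.Str.slice textL (some i) (some (i + L)) ∈ termset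
  then PySem.Set.add m (PySem.Str.slice textL (some i) (some (i + L))) else m

-- B: build the lowered-term set and the set of their lengths; scan every position of the
-- lowered text once, looking each candidate substring up in the set; then emit the terms
-- in original order, deduplicated by lowercase, keeping those whose lowercase was matched.
def find_terms_alt (text : String) (terms : List String) : List String :=
  let textL := PySem.Str.lower text
  let n : Int := PySem.Str.len textL
  let lowers := terms.map (fun t => PySem.Str.lower t)
  let termset := PySem.Set.ofList lowers
  let lengths := PySem.Set.ofList (termset.map (fun t => (PySem.Str.len t : Int)))
  let matched := (PySem.List.pyRange 0 (n + 1) 1).foldl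
    (fun m i => lengths.foldl (fun m L => pvScanStep textL termset n m i L) m)
    PySem.Set.empty
  ((terms.zip lowers).foldl
    (fun (st : PySem.Set String × List String) p =>
      if p.2 ∈ st.1 then st
      else (PySem.Set.add st.1 p.2, if p.2 ∈ matched then st.2 ++ [p.1] else st.2))
    (PySem.Set.empty, [])).2

-- ===== PRECONDITION & SPEC =====
def Spec_find_terms (text : String) (terms : List String) (out : List String) : Prop := out = find_terms_alt text terms
instance (text : String) (terms : List String) (out : List String) : Decidable (Spec_find_terms text terms out) := by unfold Spec_find_terms; infer_instance

-- ===== CLAIM (what is proved, stated in full; the proofs are below) =====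
def Claim_equal_find_terms : Prop := ∀ (text : String) (terms : List String), Dom_find_terms text terms → Spec_find_terms text terms (find_terms text terms)

-- ===== LEMMAS AND PROOFS =====

-- A's second loop, written structurally.
def dedupLoop (xs : List String) (s : PySem.Set String) (out : List String) : List String :=
  match xs with
  | [] => out
  | x :: t =>
    let xl := PySem.Str.lower x
    if xl ∈ s then dedupLoop t s out else dedupLoop t (PySem.Set.add s xl) (out ++ [x])

-- B's final loop with an abstract membership test q on the lowercase.
def fuseLoop (q : String → Bool) (xs : List String) (s : PySem.Set String) (out : List String) : List String :=
  match xs with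
  | [] => out
  | x :: t =>
    let xl := PySem.Str.lower x
    if xl ∈ s then fuseLoop q t s out
    else fuseLoop q t (PySem.Set.add s xl) (if q xl then out ++ [x] else out)

lemma foldl_eq_dedupLoop (xs : List String) (s : PySem.Set String) (out : List String) :
    (xs.foldl
      (fun (st : PySem.Set String × List String) x =>
        let xl := PySem.Str.lower x
        if xl ∈ st.1 then st else (PySem.Set.add st.1 xl, st.2 ++ [x])) (s, out)).2
      = dedupLoop xs s out := by
  induction xs generalizing s out with
  | nil => rfl
  | cons x t ih =>
    simp only [List.foldl_cons, dedupLoop]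
    split <;> exact ih _ _

lemma zip_foldl_eq_fuseLoop (matched : PySem.Set String) (xs : List String) (s : PySem.Set String) (out : List String) :
    ((xs.zip (xs.map (fun t => PySem.Str.lower t))).foldl
      (fun (st : PySem.Set String × List String) p =>
        if p.2 ∈ st.1 then st
        else (PySem.Set.add st.1 p.2, if p.2 ∈ matched then st.2 ++ [p.1] else st.2)) (s, out)).2
      = fuseLoop (fun xl => decide (xl ∈ matched)) xs s out := by
  induction xs generalizing s out with
  | nil => rfl
  | cons x t ih =>
    simp only [List.map_cons, List.zip_cons_cons, List.foldl_cons, fuseLoop, decide_eq_true_eq]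
    split
    · exact ih _ _
    · split <;> exact ih _ _

-- two fuseLoops with tests that agree on the lowercases of xs are equal
lemma fuseLoop_congr (q q' : String → Bool) (xs : List String) (s : PySem.Set String) (out : List String)
    (h : ∀ x ∈ xs, q (PySem.Str.lower x) = q' (PySem.Str.lower x)) :
    fuseLoop q xs s out = fuseLoop q' xs s out := by
  induction xs generalizing s out with
  | nil => rfl
  | cons x t ih =>
    simp only [fuseLoop]
    split
    · exact ih _ _ (fun y hy => h y (List.mem_cons_of_mem _ hy))
    · rw [h x (List.mem_cons_self ..)]
      split <;> exact ih _ _ (fun y hy => h y (List.mem_cons_of_mem _ hy))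

-- Main invariant tying A's filter-then-dedup to the fused loop with the substring test.
lemma dedup_filter_eq_fuse (textL : String) (xs : List String)
    (sA sB : PySem.Set String) (out : List String)
    (h1 : ∀ l, l ∈ sA → l ∈ sB)
    (h2 : ∀ l, l ∈ sB → PySem.Str.isIn l textL = true → l ∈ sA) :
    dedupLoop (xs.filter (fun t => PySem.Str.isIn (PySem.Str.lower t) textL)) sA out
      = fuseLoop (fun xl => PySem.Str.isIn xl textL) xs sB out := by
  induction xs generalizing sA sB out with
  | nil => rfl
  | cons x t ih =>
    by_cases hq : PySem.Str.isIn (PySem.Str.lower x) textL = true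
    · rw [List.filter_cons_of_pos (by simpa using hq)]
      simp only [dedupLoop, fuseLoop, hq, if_pos]
      by_cases hb : PySem.Str.lower x ∈ sB
      · rw [if_pos hb, if_pos (h2 _ hb hq)]
        exact ih sA sB out h1 h2
      · rw [if_neg hb, if_neg (fun ha => hb (h1 _ ha))]
        refine ih _ _ _ ?_ ?_
        · intro l hl
          rcases (PySem.Set.mem_add sA (PySem.Str.lower x) l).1 hl with h | h
          · exact (PySem.Set.mem_add sB (PySem.Str.lower x) l).2 (Or.inl (h1 _ h))
          · exact (PySem.Set.mem_add sB (PySem.Str.lower x) l).2 (Or.inr h)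
        · intro l hl hq'
          rcases (PySem.Set.mem_add sB (PySem.Str.lower x) l).1 hl with h | h
          · exact (PySem.Set.mem_add sA (PySem.Str.lower x) l).2 (Or.inl (h2 _ h hq'))
          · exact (PySem.Set.mem_add sA (PySem.Str.lower x) l).2 (Or.inr h)
    · rw [List.filter_cons_of_neg (by simpa using hq)]
      simp only [fuseLoop]
      by_cases hb : PySem.Str.lower x ∈ sB
      · rw [if_pos hb]
        exact ih sA sB out h1 h2
      · rw [if_neg hb, if_neg (by simpa using hq)]
        refine ih _ _ _ ?_ ?_
        · intro l hl
          exact (PySem.Set.mem_add sB (PySem.Str.lower x) l).2 (Or.inl (h1 _ hl))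
        · intro l hl hq'
          rcases (PySem.Set.mem_add sB (PySem.Str.lower x) l).1 hl with h | h
          · exact h2 _ h hq'
          · exact absurd (h ▸ hq') hq

-- ===== characterisation of B's matched set =====

-- the scan step only grows the set
lemma mem_scanStep_of_mem (textL : String) (termset : PySem.Set String) (n : Int)
    (m : PySem.Set String) (i L : Int) (t : String) (h : t ∈ m) :
    t ∈ pvScanStep textL termset n m i L := by
  unfold pvScanStep
  split
  · exact (PySem.Set.mem_add ..).2 (Or.inl h)
  · exact h

lemma mem_innerFold_of_mem (textL : String) (termset : PySem.Set String) (n : Int)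
    (Ls : List Int) (m : PySem.Set String) (i : Int) (t : String) (h : t ∈ m) :
    t ∈ Ls.foldl (fun m L => pvScanStep textL termset n m i L) m := by
  induction Ls generalizing m with
  | nil => exact h
  | cons L Ls ih =>
    rw [List.foldl_cons]
    exact ih _ (mem_scanStep_of_mem _ _ _ _ _ _ _ h)

-- soundness of the inner fold
lemma mem_innerFold_sound (textL : String) (termset : PySem.Set String) (n : Int)
    (Ls : List Int) (m : PySem.Set String) (i : Int) (t : String)
    (h : t ∈ Ls.foldl (fun m L => pvScanStep textL termset n m i L) m) :
    t ∈ m ∨ ∃ L ∈ Ls, i + L ≤ n ∧ t = PySem.Str.slice textL (some i) (some (i + L)) ∧ t ∈ termset := by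
  induction Ls generalizing m with
  | nil => exact Or.inl h
  | cons L Ls ih =>
    rw [List.foldl_cons] at h
    rcases ih _ h with hm | ⟨L', hL', hc⟩
    · unfold pvScanStep at hm
      split at hm
      · rcases (PySem.Set.mem_add ..).1 hm with hm' | he
        · exact Or.inl hm'
        · rename_i hcond
          exact Or.inr ⟨L, List.mem_cons_self .., hcond.1, he, he ▸ hcond.2⟩
      · exact Or.inl hm
    · exact Or.inr ⟨L', List.mem_cons_of_mem _ hL', hc⟩

-- completeness of the inner fold
lemma mem_innerFold_complete (textL : String) (termset : PySem.Set String) (n : Int)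
    (Ls : List Int) (m : PySem.Set String) (i : Int) (t : String)
    (h : ∃ L ∈ Ls, i + L ≤ n ∧ t = PySem.Str.slice textL (some i) (some (i + L)) ∧ t ∈ termset) :
    t ∈ Ls.foldl (fun m L => pvScanStep textL termset n m i L) m := by
  induction Ls generalizing m with
  | nil => exact absurd h.choose_spec.1 (List.not_mem_nil)
  | cons L Ls ih =>
    rw [List.foldl_cons]
    rcases h with ⟨L', hL', hle, heq, hts⟩
    rcases List.mem_cons.1 hL' with rfl | hL'
    · refine mem_innerFold_of_mem _ _ _ _ _ _ _ ?_
      unfold pvScanStep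
      rw [if_pos ⟨hle, heq ▸ hts⟩]
      exact (PySem.Set.mem_add ..).2 (Or.inr heq)
    · exact ih _ ⟨L', hL', hle, heq, hts⟩

-- the outer fold only grows the set
lemma mem_outerFold_of_mem (textL : String) (termset : PySem.Set String) (n : Int)
    (Is Ls : List Int) (m : PySem.Set String) (t : String) (h : t ∈ m) :
    t ∈ Is.foldl (fun m i => Ls.foldl (fun m L => pvScanStep textL termset n m i L) m) m := by
  induction Is generalizing m with
  | nil => exact h
  | cons i Is ih =>
    rw [List.foldl_cons]
    exact ih _ (mem_innerFold_of_mem _ _ _ _ _ _ _ h)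

-- soundness of the outer fold
lemma mem_outerFold_sound (textL : String) (termset : PySem.Set String) (n : Int)
    (Is Ls : List Int) (m : PySem.Set String) (t : String)
    (h : t ∈ Is.foldl (fun m i => Ls.foldl (fun m L => pvScanStep textL termset n m i L) m) m) :
    t ∈ m ∨ ∃ i ∈ Is, ∃ L ∈ Ls, i + L ≤ n ∧ t = PySem.Str.slice textL (some i) (some (i + L)) ∧ t ∈ termset := by
  induction Is generalizing m with
  | nil => exact Or.inl h
  | cons i Is ih =>
    rw [List.foldl_cons] at h
    rcases ih _ h with hm | ⟨i', hi', hc⟩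
    · rcases mem_innerFold_sound _ _ _ _ _ _ _ hm with hm' | ⟨L, hL, hc⟩
      · exact Or.inl hm'
      · exact Or.inr ⟨i, List.mem_cons_self .., L, hL, hc⟩
    · exact Or.inr ⟨i', List.mem_cons_of_mem _ hi', hc⟩

-- completeness of the outer fold
lemma mem_outerFold_complete (textL : String) (termset : PySem.Set String) (n : Int)
    (Is Ls : List Int) (m : PySem.Set String) (t : String)
    (h : ∃ i ∈ Is, ∃ L ∈ Ls, i + L ≤ n ∧ t = PySem.Str.slice textL (some i) (some (i + L)) ∧ t ∈ termset) :
    t ∈ Is.foldl (fun m i => Ls.foldl (fun m L => pvScanStep textL termset n m i L) m) m := by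
  induction Is generalizing m with
  | nil => exact absurd h.choose_spec.1 (List.not_mem_nil)
  | cons i Is ih =>
    rw [List.foldl_cons]
    rcases h with ⟨i', hi', hc⟩
    rcases List.mem_cons.1 hi' with rfl | hi'
    · exact mem_outerFold_of_mem _ _ _ _ _ _ _ (mem_innerFold_complete _ _ _ _ _ _ _ hc)
    · exact ih _ ⟨i', hi', hc⟩

-- matched membership ↔ the lowered term is a substring of the lowered text
lemma mem_matched_iff (textL : String) (termset : PySem.Set String) (t : String)
    (ht : t ∈ termset) :
    (t ∈ (PySem.List.pyRange 0 (PySem.Str.len textL + 1) 1).foldl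
        (fun m i => (PySem.Set.ofList (termset.map (fun s => PySem.Str.len s))).foldl
          (fun m L => pvScanStep textL termset (PySem.Str.len textL) m i L) m)
        PySem.Set.empty)
      ↔ PySem.Str.isIn t textL = true := by
  constructor
  · intro h
    rcases mem_outerFold_sound _ _ _ _ _ _ _ h with hm | ⟨i, hi, L, hL, hle, heq, -⟩
    · simp [PySem.Set.empty] at hm
    · have hi0 : 0 ≤ i := ((PySem.List.mem_pyRange_one).1 hi).1
      have hL0 : 0 ≤ L := by
        rcases List.mem_map.1 ((PySem.Set.mem_ofList _ _).1 hL) with ⟨s, -, rfl⟩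
        rw [PySem.Str.len_eq]; positivity
      lift i to ℕ using hi0 with j
      lift L to ℕ using hL0 with m
      have hts : t.toList = List.take m (List.drop j textL.toList) := by
        rw [heq, PySem.Str.toList_slice, PySem.Chars.slice_eq_listSlice]
        rw [PySem.List.slice_natCast_add]
      rw [PySem.Str.isIn_eq]
      exact (PySem.Chars.exists_prefix_drop_iff_isIn _ _).1 ⟨j, hts ▸ List.take_prefix m _⟩
  · intro h
    rw [PySem.Str.isIn_eq] at h
    obtain ⟨pre, suf, hps⟩ := (PySem.Chars.isIn_iff_infix _ _).1 h
    have hlen : textL.toList.length = pre.length + t.toList.length + suf.length := by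
      rw [← hps]; simp; omega
    apply mem_outerFold_complete
    refine ⟨(pre.length : Int), ?_, (t.toList.length : Int), ?_, ?_, ?_, ht⟩
    · rw [PySem.List.mem_pyRange_one, PySem.Str.len_eq]
      constructor
      · positivity
      · omega
    · rw [PySem.Set.mem_ofList]
      exact List.mem_map.2 ⟨t, ht, (PySem.Str.len_eq t).symm⟩
    · rw [PySem.Str.len_eq]; omega
    · apply String.toList_inj.mp
      rw [PySem.Str.toList_slice, PySem.Chars.slice_eq_listSlice]
      rw [PySem.List.slice_natCast_add]
      have hdrop : List.drop pre.length textL.toList = t.toList ++ suf := by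
        rw [← hps, List.append_assoc, List.drop_left]
      rw [hdrop, List.take_left]

-- ===== VERDICT (by name: the statement is the Claim_ definition above) =====
theorem find_terms_spec : Claim_equal_find_terms := by
  intro text terms _
  unfold Spec_find_terms find_terms find_terms_alt
  simp only []
  rw [PySem.List.foldl_append_if, foldl_eq_dedupLoop, zip_foldl_eq_fuseLoop]
  simp only [List.nil_append, List.map_id']
  rw [fuseLoop_congr _ (fun xl => PySem.Str.isIn xl (PySem.Str.lower text)) terms _ _ ?_]
  · exact dedup_filter_eq_fuse _ _ _ _ _ (fun l h => h) (fun l h _ => h)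
  · intro x hx
    have ht : PySem.Str.lower x ∈ PySem.Set.ofList (terms.map (fun t => PySem.Str.lower t)) :=
      (PySem.Set.mem_ofList _ _).2 (List.mem_map.2 ⟨x, hx, rfl⟩)
    simp only [mem_matched_iff (PySem.Str.lower text) _ _ ht]
    cases hq : PySem.Str.isIn (PySem.Str.lower x) (PySem.Str.lower text) <;> simp
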